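-- pv_equiv track=rewrite | github.com/LucaMica02/AlgorithmsCourseSapienza | Dynamic_Programming/Dynamic_Programming_Exercises.py | accomodatePeople1
-- ===== SOURCE A (Python) =====
-- def accomodatePeople1(n):
--     if n == 0 or n == 1:
--         return 1
--     T = [0] * (n+1)
--     T[0] = T[1] = 1
--     #IDEA T[i]:
--     # T[i-1] ways in which the people i ends up in a single room +
--     # T[i-2] * (i-1) ways in which the people i ends up in a double room
--     for i in range(2, n+1):
--         T[i] = T[i-1] + (i-1) * T[i-2]
--     return T[n]
-- ===== SOURCE B (Python) =====
-- def accomodatePeople1(n):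
--     if n == 0 or n == 1:
--         return 1
--     # closed-form sum over the number k of matched pairs:
--     # term_k = n! / (k! * 2^k * (n-2k)!), maintained incrementally with exact integer division
--     total = 1
--     term = 1
--     for k in range(1, n // 2 + 1):
--         term = term * (n - 2*k + 1) * (n - 2*k + 2) // (2*k)
--         total += term
--     return total
-- ===== Notes on version B (the rewrite author's own statement) =====
-- stated objective: alternative
-- what changed: Replaces the O(n)-space forward two-term recurrence table by a direct summation over the number k of matched pairs, maintaining the closed-form term for k pairs incrementally with exact integer division.
import Mathlib
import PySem

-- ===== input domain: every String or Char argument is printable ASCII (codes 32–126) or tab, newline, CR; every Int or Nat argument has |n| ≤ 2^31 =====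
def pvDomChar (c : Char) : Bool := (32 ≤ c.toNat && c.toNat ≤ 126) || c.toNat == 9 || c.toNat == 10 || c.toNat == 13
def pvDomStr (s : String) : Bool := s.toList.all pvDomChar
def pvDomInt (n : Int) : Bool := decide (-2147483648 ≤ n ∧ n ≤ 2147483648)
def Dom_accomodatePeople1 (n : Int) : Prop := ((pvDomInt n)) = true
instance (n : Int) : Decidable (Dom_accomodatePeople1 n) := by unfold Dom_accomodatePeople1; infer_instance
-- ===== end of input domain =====

-- B replaces A's two-term forward recurrence table by the closed-form sum over the
-- number of matched pairs (same O(n) time, O(1) space); equivalence is about the return value.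

-- ===== PORT A =====
-- transliteration of A: build the full table of the forward two-term recurrence and return its last entry
def accomodatePeople1 (n : Int) : Int :=
  if n == 0 || n == 1 then 1
  else
    let T : List Int := List.replicate (n + 1).toNat 0
    let T := PySem.List.pySetD T 0 1
    let T := PySem.List.pySetD T 1 1
    let T := (PySem.List.pyRange 2 (n + 1) 1).foldl
      (fun T i =>
        PySem.List.pySetD T i
          (PySem.List.pyGetD T (i - 1) 0 + (i - 1) * PySem.List.pyGetD T (i - 2) 0)) T
    PySem.List.pyGetD T n 0

-- ===== PORT B =====
-- transliteration of Source B: accumulate (total, term) over k = 1 .. n//2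
def accomodatePeople1_alt (n : Int) : Int :=
  if n == 0 || n == 1 then 1
  else
    let s := (PySem.List.pyRange 1 (PySem.Int.floordiv n 2 + 1) 1).foldl
      (fun (p : Int × Int) k =>
        let term := PySem.Int.floordiv (p.2 * (n - 2 * k + 1) * (n - 2 * k + 2)) (2 * k)
        (p.1 + term, term)) (1, 1)
    s.1

-- ===== PRECONDITION & SPEC =====
-- On negative n the Python A raises IndexError (its table is too short for the seed writes); excluded.
def Pre_accomodatePeople1 (n : Int) : Prop := 0 ≤ n
instance (n : Int) : Decidable (Pre_accomodatePeople1 n) := by unfold Pre_accomodatePeople1; infer_instance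
def pvWitness_accomodatePeople1 : Int := 5

def Spec_accomodatePeople1 (n : Int) (out : Int) : Prop := out = accomodatePeople1_alt n
instance (n : Int) (out : Int) : Decidable (Spec_accomodatePeople1 n out) := by unfold Spec_accomodatePeople1; infer_instance

-- ===== CLAIM (what is proved, stated in full; the proofs are below) =====
def Claim_equal_accomodatePeople1 : Prop := ∀ (n : Int), Dom_accomodatePeople1 n → Pre_accomodatePeople1 n → Spec_accomodatePeople1 n (accomodatePeople1 n)


-- ===== LEMMAS AND PROOFS =====

def invol : ℕ → ℕ
  | 0 => 1
  | 1 => 1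
  | n + 2 => invol (n + 1) + (n + 1) * invol n

def dF : ℕ → ℕ
  | 0 => 1
  | k + 1 => (2 * k + 1) * dF k

def TT (n k : ℕ) : ℕ := n.choose (2 * k) * dF k

def SS (n : ℕ) : ℕ := ∑ k ∈ Finset.range (n / 2 + 1), TT n k

lemma TT_zero (n : ℕ) : TT n 0 = 1 := by simp [TT, dF]

lemma TT_eq_zero {n k : ℕ} (h : n < 2 * k) : TT n k = 0 := by
  simp [TT, Nat.choose_eq_zero_of_lt h]

lemma TT_step (n k : ℕ) :
    TT n (k + 1) * (2 * (k + 1)) = TT n k * ((n - (2 * k + 1)) * (n - 2 * k)) := by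
  have h1 : n.choose (2 * k + 1) * (2 * k + 1) = n.choose (2 * k) * (n - 2 * k) :=
    Nat.choose_succ_right_eq n (2 * k)
  have h2 : n.choose (2 * k + 2) * (2 * k + 2) = n.choose (2 * k + 1) * (n - (2 * k + 1)) :=
    Nat.choose_succ_right_eq n (2 * k + 1)
  have key : TT n (k + 1) * (2 * (k + 1)) =
      (n.choose (2 * k + 2) * (2 * k + 2)) * ((2 * k + 1) * dF k) := by
    simp only [TT, dF, show 2 * (k + 1) = 2 * k + 2 from by ring]
    ring
  rw [key, h2, mul_comm (n.choose (2 * k + 1)) (n - (2 * k + 1)), mul_assoc,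
      ← mul_assoc (n.choose (2 * k + 1)), h1]
  simp only [TT]
  ring

lemma TT_rec (n k : ℕ) : TT (n + 2) (k + 1) = TT (n + 1) (k + 1) + (n + 1) * TT n k := by
  have pascal : (n + 2).choose (2 * k + 2) =
      (n + 1).choose (2 * k + 1) + (n + 1).choose (2 * k + 2) := Nat.choose_succ_succ (n + 1) (2 * k + 1)
  have h3 : (n + 1) * n.choose (2 * k) = (n + 1).choose (2 * k + 1) * (2 * k + 1) := by
    have := Nat.add_one_mul_choose_eq n (2 * k)
    omega
  have key : TT (n + 2) (k + 1) =
      (n + 1).choose (2 * k + 1) * ((2 * k + 1) * dF k) + TT (n + 1) (k + 1) := by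
    simp only [TT, dF, show 2 * (k + 1) = 2 * k + 2 from by ring, pascal]
    ring
  rw [key, ← mul_assoc, ← h3]
  simp only [TT]; ring

lemma SS_rec (n : ℕ) : SS (n + 2) = SS (n + 1) + (n + 1) * SS n := by
  have hr2 : (n + 2) / 2 + 1 = (n / 2 + 1) + 1 := by omega
  have expand : SS (n + 2) = (∑ k ∈ Finset.range (n / 2 + 1), TT (n + 2) (k + 1)) + 1 := by
    rw [SS, hr2, Finset.sum_range_succ']
    simp [TT_zero]
  have key : (∑ k ∈ Finset.range (n / 2 + 1), TT (n + 1) (k + 1)) + 1 =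
      ∑ k ∈ Finset.range (n / 2 + 2), TT (n + 1) k := by
    rw [Finset.sum_range_succ' (fun k => TT (n + 1) k) (n / 2 + 1), TT_zero]
  have tail : ∑ k ∈ Finset.range (n / 2 + 2), TT (n + 1) k = SS (n + 1) := by
    rw [SS]
    rcases Nat.even_or_odd n with he | ho
    · obtain ⟨m, rfl⟩ := he
      have h1 : (m + m) / 2 + 2 = ((m + m + 1) / 2 + 1) + 1 := by omega
      rw [h1, Finset.sum_range_succ, TT_eq_zero (show m + m + 1 < 2 * ((m + m + 1) / 2 + 1) by omega)]
      simp
    · obtain ⟨m, rfl⟩ := ho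
      have h1 : (2 * m + 1) / 2 + 2 = (2 * m + 1 + 1) / 2 + 1 := by omega
      rw [h1]
  calc SS (n + 2) = (∑ k ∈ Finset.range (n / 2 + 1), TT (n + 2) (k + 1)) + 1 := expand
    _ = ((∑ k ∈ Finset.range (n / 2 + 1), TT (n + 1) (k + 1)) + 1) + (n + 1) * SS n := by
        simp only [TT_rec, Finset.sum_add_distrib, ← Finset.mul_sum]
        rw [SS]
        ring
    _ = SS (n + 1) + (n + 1) * SS n := by rw [key, tail]

lemma SS_zero : SS 0 = 1 := by simp [SS, TT_zero]
lemma SS_one : SS 1 = 1 := by simp [SS, TT_zero]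

lemma SS_eq_invol (n : ℕ) : SS n = invol n := by
  induction n using Nat.strong_induction_on with
  | _ n ih =>
    match n with
    | 0 => simpa [invol] using SS_zero
    | 1 => simpa [invol] using SS_one
    | n + 2 => rw [SS_rec, invol, ih (n + 1) (by omega), ih n (by omega)]

def goodUpto (N : ℕ) (L : List Int) (i : ℕ) : Prop :=
  L.length = N + 1 ∧ ∀ j : ℕ, j ≤ i → PySem.List.pyGetD L (j : Int) 0 = (invol j : Int)

lemma goodUpto_step (N : ℕ) (L : List Int) (i : ℕ) (h1 : 1 ≤ i) (hiN : i + 1 ≤ N)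
    (hg : goodUpto N L i) :
    goodUpto N
      (PySem.List.pySetD L ((i : Int) + 1)
        (PySem.List.pyGetD L (((i : Int) + 1) - 1) 0 +
          (((i : Int) + 1) - 1) * PySem.List.pyGetD L (((i : Int) + 1) - 2) 0)) (i + 1) := by
  obtain ⟨hlen, hv⟩ := hg
  have e1 : ((i : Int) + 1) - 1 = ((i : ℕ) : Int) := by ring
  have e2 : ((i : Int) + 1) - 2 = (((i - 1 : ℕ)) : Int) := by
    rw [Nat.cast_sub h1]; push_cast; ring
  have e3 : ((i : Int) + 1) = (((i + 1 : ℕ)) : Int) := by push_cast; ring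
  rw [e1, e2, e3]
  constructor
  · rw [PySem.List.pySetD_natCast, List.length_set, hlen]
  · intro j hj
    rw [PySem.List.pyGetD_pySetD_natCast L (i + 1) j _ 0 (by omega)]
    by_cases hji : j = i + 1
    · subst hji
      rw [if_pos rfl, hv i (by omega), hv (i - 1) (by omega)]
      have hrw : invol (i + 1 - 1 + 1) = invol (i + 1 - 1) + (i + 1 - 1 + 1 - 1) * invol (i + 1 - 1 - 1) := by
        obtain ⟨i', rfl⟩ : ∃ i', i = i' + 1 := ⟨i - 1, by omega⟩
        simp [invol]
      have : invol (i + 1) = invol i + i * invol (i - 1) := by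
        obtain ⟨i', rfl⟩ : ∃ i', i = i' + 1 := ⟨i - 1, by omega⟩
        simp [invol]
      rw [this]
      push_cast
      ring
    · rw [if_neg hji]
      exact hv j (by omega)

lemma A_loop (N : ℕ) (L0 : List Int) (hg0 : goodUpto N L0 1) :
    ∀ m : ℕ, 1 ≤ m → m ≤ N →
      goodUpto N
        ((PySem.List.pyRange 2 ((m : Int) + 1) 1).foldl
          (fun T i =>
            PySem.List.pySetD T i
              (PySem.List.pyGetD T (i - 1) 0 + (i - 1) * PySem.List.pyGetD T (i - 2) 0)) L0) m := by
  intro m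
  induction m with
  | zero => omega
  | succ m ih =>
    intro _ hmN
    by_cases hm1 : m = 0
    · subst hm1
      rw [show ((0 + 1 : ℕ) : Int) + 1 = 2 from by norm_num, PySem.List.pyRange_one_eq_nil (by omega)]
      simpa using hg0
    · have hrec := ih (by omega) (by omega)
      have hsplit : PySem.List.pyRange 2 (((m + 1 : ℕ) : Int) + 1) 1 =
          PySem.List.pyRange 2 ((m : Int) + 1) 1 ++ [((m : Int) + 1)] := by
        have h : (((m + 1 : ℕ) : Int) + 1) = ((m : Int) + 1) + 1 := by push_cast; ring
        rw [h, PySem.List.pyRange_one_succ_right (by omega)]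
      rw [hsplit, List.foldl_append]
      simp only [List.foldl_cons, List.foldl_nil]
      exact goodUpto_step N _ m (by omega) (by omega) hrec

lemma portA_eq_invol (n : Int) (hn : 0 ≤ n) : accomodatePeople1 n = (invol n.toNat : Int) := by
  by_cases h01 : n = 0 ∨ n = 1
  · rcases h01 with rfl | rfl <;> simp [accomodatePeople1, invol]
  · have hn2 : 2 ≤ n := by omega
    obtain ⟨N, rfl⟩ : ∃ N : ℕ, n = (N : Int) := ⟨n.toNat, by omega⟩
    have hN : 2 ≤ N := by exact_mod_cast hn2
    rw [accomodatePeople1, if_neg (by simp; omega)]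
    have hg0 : goodUpto N (PySem.List.pySetD (PySem.List.pySetD (List.replicate ((N : Int) + 1).toNat 0) 0 1) 1 1) 1 := by
      have hT : (((N : Int) + 1).toNat) = N + 1 := by omega
      have hS : PySem.List.pySetD (PySem.List.pySetD (List.replicate ((N : Int) + 1).toNat 0) 0 1) 1 1
          = ((List.replicate (N + 1) (0 : Int)).set 0 1).set 1 1 := by
        rw [PySem.List.pySetD_of_nonneg _ _ (by norm_num), PySem.List.pySetD_of_nonneg _ _ (by norm_num)]
        simp [hT]
      rw [hS]
      constructor
      · simp
      · intro j hj
        rw [PySem.List.pyGetD_natCast]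
        interval_cases j
        · rw [List.getD_eq_getElem?_getD, List.getElem?_set_ne (by omega), List.getElem?_set_self (by simp)]
          simp [invol]
        · rw [List.getD_eq_getElem?_getD, List.getElem?_set_self (by simp; omega)]
          simp [invol]
    have hfinal := A_loop N _ hg0 N (by omega) (le_refl N)
    obtain ⟨hlen, hv⟩ := hfinal
    simpa using hv N (le_refl N)

lemma B_loop (N : ℕ) :
    ∀ j : ℕ, j ≤ N / 2 →
      ((PySem.List.pyRange 1 ((j : Int) + 1) 1).foldl
        (fun (p : Int × Int) k =>
          let term := PySem.Int.floordiv (p.2 * ((N : Int) - 2 * k + 1) * ((N : Int) - 2 * k + 2)) (2 * k)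
          (p.1 + term, term)) (1, 1)) =
      (((∑ k ∈ Finset.range (j + 1), TT N k : ℕ) : Int), ((TT N j : ℕ) : Int)) := by
  intro j
  induction j with
  | zero =>
    intro _
    rw [show ((0 : ℕ) : Int) + 1 = 1 from by norm_num, PySem.List.pyRange_one_eq_nil (by omega)]
    simp [TT_zero]
  | succ j ih =>
    intro hj
    have hrec := ih (by omega)
    have hsplit : PySem.List.pyRange 1 (((j + 1 : ℕ) : Int) + 1) 1 =
        PySem.List.pyRange 1 ((j : Int) + 1) 1 ++ [((j : Int) + 1)] := by
      have h : (((j + 1 : ℕ) : Int) + 1) = ((j : Int) + 1) + 1 := by push_cast; ring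
      rw [h, PySem.List.pyRange_one_succ_right (by omega)]
    rw [hsplit, List.foldl_append, hrec]
    simp only [List.foldl_cons, List.foldl_nil]
    have hdiv : PySem.Int.floordiv
        (((TT N j : ℕ) : Int) * ((N : Int) - 2 * ((j : Int) + 1) + 1) * ((N : Int) - 2 * ((j : Int) + 1) + 2))
        (2 * ((j : Int) + 1)) = ((TT N (j + 1) : ℕ) : Int) := by
    -- exactness via TT_step
      have hnum : ((TT N j : ℕ) : Int) * ((N : Int) - 2 * ((j : Int) + 1) + 1) * ((N : Int) - 2 * ((j : Int) + 1) + 2)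
          = ((TT N (j + 1) : ℕ) : Int) * (2 * ((j : Int) + 1)) := by
        have e1 : ((N : Int) - 2 * ((j : Int) + 1) + 1) = (((N - (2 * j + 1) : ℕ)) : Int) := by
          rw [Nat.cast_sub (by omega : 2 * j + 1 ≤ N)]; push_cast; ring
        have e2 : ((N : Int) - 2 * ((j : Int) + 1) + 2) = (((N - 2 * j : ℕ)) : Int) := by
          rw [Nat.cast_sub (by omega : 2 * j ≤ N)]; push_cast; ring
        rw [e1, e2]
        have hstep := congrArg (fun x : ℕ => (x : Int)) (TT_step N j)
        push_cast at hstep ⊢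
        linarith
      rw [hnum, PySem.Int.floordiv_eq_ediv_of_pos (by positivity)]
      exact Int.mul_ediv_cancel _ (by positivity)
    simp only [hdiv]
    rw [Prod.mk.injEq]
    refine ⟨?_, rfl⟩
    rw [Finset.sum_range_succ (fun k => TT N k) (j + 1)]
    push_cast
    ring

lemma portB_eq_SS (n : Int) (hn : 0 ≤ n) : accomodatePeople1_alt n = (SS n.toNat : Int) := by
  by_cases h01 : n = 0 ∨ n = 1
  · rcases h01 with rfl | rfl <;> simp [accomodatePeople1_alt, SS_zero, SS_one]
  · have hn2 : 2 ≤ n := by omega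
    obtain ⟨N, rfl⟩ : ∃ N : ℕ, n = (N : Int) := ⟨n.toNat, by omega⟩
    have hN : 2 ≤ N := by exact_mod_cast hn2
    rw [accomodatePeople1_alt, if_neg (by simp; omega)]
    have hfd : PySem.Int.floordiv (N : Int) 2 = ((N / 2 : ℕ) : Int) := by
      exact_mod_cast PySem.Int.floordiv_natCast N 2
    rw [hfd]
    have hb := B_loop N (N / 2) (le_refl _)
    simp only [hb]
    simp [SS]

-- ===== VERDICT (by name: the statement is the Claim_ definition above) =====
theorem accomodatePeople1_spec : Claim_equal_accomodatePeople1 := by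
  intro n _ hpre
  unfold Spec_accomodatePeople1
  rw [portA_eq_invol n hpre, portB_eq_SS n hpre, SS_eq_invol]
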